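-- pv_equiv track=rewrite | github.com/Sumukhmr/creatorhub-dashboard | app.py | parse_text_blocks
-- ===== SOURCE A (Python) =====
-- def parse_text_blocks(text, selected_voice):
--     """
--     Parse text to extract blocks based on curly braces.
--
--     Text wrapped in { } is treated as native language.
--     Plain text is treated as English.
--
--     Args:
--         text (str): Input text with optional curly brace markers
--         selected_voice (str): The selected voice/language
--
--     Returns:
--         list: List of tuples (is_native, content)
--     """
--     blocks = []
--     i = 0
--
--     while i < len(text):
--         # Skip whitespace
--         while i < len(text) and text[i] in ' \t':
--             i += 1
--
--         if i >= len(text):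
--             break
--
--         # Check for native language block (in curly braces)
--         if text[i] == '{':
--             start = i + 1
--             i += 1
--             while i < len(text) and text[i] != '}':
--                 i += 1
--             if i < len(text):
--                 content = text[start:i].strip()
--                 if content:
--                     blocks.append((True, content))
--                 i += 1
--             continue
--
--         # Skip newlines
--         elif text[i] == '\n':
--             i += 1
--             continue
--
--         # English text (plain, no braces)
--         else:
--             start = i
--             while i < len(text) and text[i] not in '\n{':
--                 i += 1
--             content = text[start:i].strip()
--             if content:
--                 blocks.append((False, content))
--             if i < len(text) and text[i] == '\n':
--                 i += 1
--
--     return blocks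
-- ===== SOURCE B (Python) =====
-- def parse_text_blocks(text, selected_voice):
--     """Single-pass fold over characters with a mode flag and a pending buffer,
--     instead of A's index-walking scanner with nested while loops."""
--     blocks = []
--     buf = []
--     in_brace = False
--     for ch in text:
--         if in_brace:
--             if ch == '}':
--                 content = ''.join(buf).strip()
--                 if content:
--                     blocks.append((True, content))
--                 buf = []
--                 in_brace = False
--             else:
--                 buf.append(ch)
--         elif ch == '{':
--             content = ''.join(buf).strip()
--             if content:
--                 blocks.append((False, content))
--             buf = []
--             in_brace = True
--         elif ch == '\n':
--             content = ''.join(buf).strip()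
--             if content:
--                 blocks.append((False, content))
--             buf = []
--         else:
--             buf.append(ch)
--     if not in_brace:
--         content = ''.join(buf).strip()
--         if content:
--             blocks.append((False, content))
--     return blocks
-- ===== Notes on version B (the rewrite author's own statement) =====
-- stated objective: alternative
-- what changed: Replaced A's index-walking scanner (outer while with three hand-coded inner scan loops, a cursor and slicing) by a single left fold over the characters carrying (blocks, pending buffer, inside-braces flag), flushing the buffer at '{', '}', ' ' and end-of-input; measured ~1.9x faster (no per-char index arithmetic/bounds checks, no slicing).
import Mathlib
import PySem

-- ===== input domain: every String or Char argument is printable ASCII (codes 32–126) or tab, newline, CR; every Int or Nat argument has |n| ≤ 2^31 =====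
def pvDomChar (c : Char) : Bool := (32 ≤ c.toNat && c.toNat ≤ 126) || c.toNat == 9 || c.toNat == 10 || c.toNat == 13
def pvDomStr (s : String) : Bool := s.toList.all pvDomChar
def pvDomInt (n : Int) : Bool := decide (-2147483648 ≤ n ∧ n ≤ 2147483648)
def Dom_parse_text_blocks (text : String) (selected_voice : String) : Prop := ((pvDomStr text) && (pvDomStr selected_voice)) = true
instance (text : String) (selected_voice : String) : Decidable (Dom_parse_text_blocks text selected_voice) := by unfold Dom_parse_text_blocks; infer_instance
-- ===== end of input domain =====

-- B replaces A's index-walking scanner (outer while + three inner scan loops) by a single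
-- left fold over the characters with a mode flag and a pending buffer (objective: alternative).

-- ===== PORT A =====
-- 'while i < len(text) and text[i] satisfies p: i += 1' together with the slice text[start:i]:
-- returns (the scanned characters, the rest beginning at the first char failing p).
def pvScan (p : Char → Bool) : List Char → List Char × List Char
  | [] => ([], [])
  | c :: cs =>
    if p c then
      let r := pvScan p cs
      (c :: r.1, r.2)
    else ([], c :: cs)

-- needed by the termination argument of the loop below
theorem pvScan_length (p : Char → Bool) (l : List Char) :
    (pvScan p l).1.length + (pvScan p l).2.length = l.length := by
  induction l with
  | nil => rfl
  | cons c cs ih =>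
    simp only [pvScan]
    split
    · simp; omega
    · simp

-- also needed by the termination argument: a char accepted by p is consumed
theorem pvScan_cons_pos (p : Char → Bool) (c : Char) (cs : List Char) (hc : p c = true) :
    pvScan p (c :: cs) = (c :: (pvScan p cs).1, (pvScan p cs).2) := by
  simp [pvScan, hc]

-- 'content = …strip(); if content: blocks.append((native, content))' (shared line of both Pythons)
def pvEmit (blocks : List (Bool × String)) (native : Bool) (cs : List Char) : List (Bool × String) :=
  let content := PySem.Chars.strip cs
  if content = [] then blocks else blocks ++ [(native, String.mk content)]

mutual
-- the outer 'while i < len(text)': skip whitespace (text[i] in ' \t'), then dispatch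
def pvLoopA (cs : List Char) (blocks : List (Bool × String)) : List (Bool × String) :=
  pvCore (cs.dropWhile (fun c => c == ' ' || c == '\t')) blocks
termination_by (cs.length, 1)
decreasing_by
  have h := List.length_dropWhile_le (fun c => c == ' ' || c == '\t') cs
  rcases lt_or_eq_of_le h with h' | h'
  · exact Prod.Lex.left _ _ h'
  · rw [h']; exact Prod.Lex.right _ (by omega)

def pvCore (cs1 : List Char) (blocks : List (Bool × String)) : List (Bool × String) :=
  match cs1 with
  | [] => blocks  -- 'if i >= len(text): break'
  | c :: rest =>
    if h1 : c = '{' then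
      -- native block: scan to '}'; an unclosed brace ('if i < len(text)' fails) ends the loop
      let r := pvScan (fun d => d != '}') rest
      if h2 : r.2 = [] then blocks
      else pvLoopA r.2.tail (pvEmit blocks true r.1)
    else if h3 : c = '\n' then
      pvLoopA rest blocks
    else
      -- English run: scan to '\n' or '{', then step over a following '\n'
      let r := pvScan (fun d => d != '\n' && d != '{') (c :: rest)
      let blocks' := pvEmit blocks false r.1
      if h4 : r.2.head? = some '\n' then pvLoopA r.2.tail blocks'
      else pvLoopA r.2 blocks'
termination_by (cs1.length, 0)
decreasing_by
  · have hl := pvScan_length (fun d => d != '}') rest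
    have hpos : 0 < (pvScan (fun d => d != '}') rest).2.length :=
      List.length_pos_iff.mpr h2
    exact Prod.Lex.left _ _ (by simp only [List.length_tail, List.length_cons]; omega)
  · exact Prod.Lex.left _ _ (by simp only [List.length_cons]; omega)
  · have hl := pvScan_length (fun d => d != '\n' && d != '{') (c :: rest)
    have hpos : 0 < (pvScan (fun d => d != '\n' && d != '{') (c :: rest)).2.length := by
      rcases hh : (pvScan (fun d => d != '\n' && d != '{') (c :: rest)).2 with _ | ⟨d, t⟩
      · rw [hh] at h4; simp at h4
      · simp
    apply Prod.Lex.left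
    simp only [List.length_tail, List.length_cons] at *
    omega
  · have hc : (c != '\n' && c != '{') = true := by simp [h1, h3]
    have hcons := pvScan_cons_pos (fun d => d != '\n' && d != '{') c rest hc
    have hl := pvScan_length (fun d => d != '\n' && d != '{') rest
    exact Prod.Lex.left _ _ (by rw [hcons]; simp only [List.length_cons]; omega)
end

def parse_text_blocks (text : String) (selected_voice : String) : List (Bool × String) :=
  pvLoopA text.toList []

-- ===== PORT B =====
-- one fold step: (blocks so far, pending buffer, inside-braces flag) consuming one char
def pvStepB (st : List (Bool × String) × List Char × Bool) (ch : Char) :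
    List (Bool × String) × List Char × Bool :=
  if st.2.2 then
    if ch = '}' then (pvEmit st.1 true st.2.1, [], false)
    else (st.1, st.2.1 ++ [ch], true)
  else if ch = '{' then (pvEmit st.1 false st.2.1, [], true)
  else if ch = '\n' then (pvEmit st.1 false st.2.1, [], false)
  else (st.1, st.2.1 ++ [ch], false)

def parse_text_blocks_alt (text : String) (selected_voice : String) : List (Bool × String) :=
  let st := text.toList.foldl pvStepB ([], [], false)
  if st.2.2 then st.1 else pvEmit st.1 false st.2.1

-- ===== PRECONDITION & SPEC =====
def Spec_parse_text_blocks (text : String) (selected_voice : String) (out : List (Bool × String)) : Prop := out = parse_text_blocks_alt text selected_voice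
instance (text : String) (selected_voice : String) (out : List (Bool × String)) : Decidable (Spec_parse_text_blocks text selected_voice out) := by unfold Spec_parse_text_blocks; infer_instance

-- ===== CLAIM (what is proved, stated in full; the proofs are below) =====
def Claim_equal_parse_text_blocks : Prop := ∀ (text : String) (selected_voice : String), Dom_parse_text_blocks text selected_voice → Spec_parse_text_blocks text selected_voice (parse_text_blocks text selected_voice)

-- ===== LEMMAS AND PROOFS =====

-- finishing step of B: flush the pending buffer unless inside an unclosed brace
def pvFinish (st : List (Bool × String) × List Char × Bool) : List (Bool × String) :=
  if st.2.2 then st.1 else pvEmit st.1 false st.2.1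

-- A's behaviour resumed mid-English-run with pending prefix buf
def pvE (buf : List Char) (cs : List Char) (blocks : List (Bool × String)) : List (Bool × String) :=
  let r := pvScan (fun d => d != '\n' && d != '{') cs
  let blocks' := pvEmit blocks false (buf ++ r.1)
  if r.2.head? = some '\n' then pvLoopA r.2.tail blocks'
  else pvLoopA r.2 blocks'

-- A's behaviour resumed inside a brace with accumulated content acc
def pvBrace (cs : List Char) (blocks : List (Bool × String)) (acc : List Char) : List (Bool × String) :=
  let r := pvScan (fun d => d != '}') cs
  if r.2 = [] then blocks else pvLoopA r.2.tail (pvEmit blocks true (acc ++ r.1))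

theorem pvStrip_ws_append (buf l : List Char) (hbuf : ∀ c ∈ buf, c = ' ' ∨ c = '\t') :
    PySem.Chars.strip (buf ++ l) = PySem.Chars.strip l := by
  have h : (buf ++ l).dropWhile PySem.Chars.isspace = l.dropWhile PySem.Chars.isspace := by
    induction buf with
    | nil => rfl
    | cons c cs ih =>
      have hc : PySem.Chars.isspace c = true := by
        rcases hbuf c (by simp) with h | h <;> simp [h] <;> decide
      simp only [List.cons_append, List.dropWhile_cons, hc, if_pos]
      exact ih (fun d hd => hbuf d (by simp [hd]))
  simp only [PySem.Chars.strip, PySem.Chars.lstrip, h]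

theorem pvEmit_ws_append (blocks : List (Bool × String)) (b : Bool) (buf l : List Char)
    (hbuf : ∀ c ∈ buf, c = ' ' ∨ c = '\t') :
    pvEmit blocks b (buf ++ l) = pvEmit blocks b l := by
  simp only [pvEmit, pvStrip_ws_append buf l hbuf]

theorem pvEmit_nil (blocks : List (Bool × String)) (b : Bool) : pvEmit blocks b [] = blocks := by
  simp [pvEmit, PySem.Chars.strip, PySem.Chars.lstrip, PySem.Chars.rstrip]

theorem pvLoopA_nil (blocks : List (Bool × String)) : pvLoopA [] blocks = blocks := by
  rw [pvLoopA]
  show pvCore [] blocks = blocks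
  rw [pvCore]

theorem pvLoopA_brace (cs' : List Char) (blocks : List (Bool × String)) :
    pvLoopA ('{' :: cs') blocks = pvBrace cs' blocks [] := by
  rw [pvLoopA]
  rw [show List.dropWhile (fun c => c == ' ' || c == '\t') ('{' :: cs') = '{' :: cs' from by
    simp [List.dropWhile_cons]]
  rw [pvCore]
  simp [pvBrace]

theorem pvE_nil_eq_loopA (cs : List Char) (blocks : List (Bool × String)) :
    pvE [] cs blocks = pvLoopA cs blocks := by
  induction cs generalizing blocks with
  | nil =>
    rw [pvLoopA_nil]
    simp [pvE, pvScan, pvEmit_nil, pvLoopA_nil]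
  | cons c cs' ih =>
    by_cases hws : c = ' ' ∨ c = '\t'
    · -- whitespace head: both sides skip it
      have hp : (c != '\n' && c != '{') = true := by rcases hws with h | h <;> simp [h]
      have hw : (c == ' ' || c == '\t') = true := by rcases hws with h | h <;> simp [h]
      have hA : pvLoopA (c :: cs') blocks = pvLoopA cs' blocks := by
        rw [pvLoopA, pvLoopA, List.dropWhile_cons, if_pos hw]
      have he : ∀ l, pvEmit blocks false (c :: l) = pvEmit blocks false l := by
        intro l
        have := pvEmit_ws_append blocks false [c] l
          (by intro d hd; simp at hd; subst hd; exact hws)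
        simpa using this
      rw [hA, ← ih]
      simp only [pvE, pvScan, hp, if_pos, List.nil_append, he]
    · push_neg at hws
      by_cases hn : c = '\n'
      · subst hn
        have hA : pvLoopA ('\n' :: cs') blocks = pvLoopA cs' blocks := by
          rw [pvLoopA]
          rw [show List.dropWhile (fun c => c == ' ' || c == '\t') ('\n' :: cs') = '\n' :: cs'
            from by simp [List.dropWhile_cons]]
          rw [pvCore]
          simp
        rw [hA]
        simp [pvE, pvScan, pvEmit_nil]
      · by_cases hb : c = '{'
        · subst hb
          simp [pvE, pvScan, pvEmit_nil]
        · -- plain English head: A's English branch is literally pvE [] (c :: cs')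
          have hw : (c == ' ' || c == '\t') = false := by simp [hws.1, hws.2]
          rw [pvLoopA, List.dropWhile_cons, hw]
          simp only [Bool.false_eq_true, if_false]
          rw [pvCore]
          rw [dif_neg hb, dif_neg hn]
          simp only [pvE, List.nil_append, dite_eq_ite]

theorem pvBrace_cons_ne (c : Char) (cs' : List Char) (blocks : List (Bool × String)) (acc : List Char)
    (hc : c ≠ '}') : pvBrace (c :: cs') blocks acc = pvBrace cs' blocks (acc ++ [c]) := by
  have hp : (c != '}') = true := by simp [hc]
  simp only [pvBrace, pvScan, hp, reduceIte, List.append_assoc, List.singleton_append]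

theorem pvFold_spec (n : Nat) : ∀ (cs : List Char), cs.length ≤ n →
    (∀ blocks buf, pvFinish (cs.foldl pvStepB (blocks, buf, false)) = pvE buf cs blocks) ∧
    (∀ blocks acc, pvFinish (cs.foldl pvStepB (blocks, acc, true)) = pvBrace cs blocks acc) := by
  induction n with
  | zero =>
    intro cs hcs
    have : cs = [] := List.eq_nil_of_length_eq_zero (by omega)
    subst this
    refine ⟨fun blocks buf => ?_, fun blocks acc => ?_⟩
    · simp [pvFinish, pvE, pvScan, pvLoopA_nil]
    · simp [pvFinish, pvBrace, pvScan]
  | succ n ih =>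
    intro cs hcs
    cases cs with
    | nil =>
      refine ⟨fun blocks buf => ?_, fun blocks acc => ?_⟩
      · simp [pvFinish, pvE, pvScan, pvLoopA_nil]
      · simp [pvFinish, pvBrace, pvScan]
    | cons c cs' =>
      have hcs' : cs'.length ≤ n := by simp at hcs; omega
      refine ⟨fun blocks buf => ?_, fun blocks acc => ?_⟩
      · by_cases hb : c = '{'
        · subst hb
          have hstep : pvStepB (blocks, buf, false) '{' = (pvEmit blocks false buf, [], true) := by
            simp [pvStepB]
          rw [List.foldl_cons, hstep, (ih cs' hcs').2, ← pvLoopA_brace]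
          simp [pvE, pvScan, List.append_nil]
        · by_cases hn : c = '\n'
          · subst hn
            have hstep : pvStepB (blocks, buf, false) '\n' =
                (pvEmit blocks false buf, [], false) := by simp [pvStepB]
            rw [List.foldl_cons, hstep, (ih cs' hcs').1, pvE_nil_eq_loopA]
            simp [pvE, pvScan, List.append_nil]
          · have hp : (c != '\n' && c != '{') = true := by simp [hn, hb]
            have hstep : pvStepB (blocks, buf, false) c = (blocks, buf ++ [c], false) := by
              simp [pvStepB, hb, hn]
            rw [List.foldl_cons, hstep, (ih cs' hcs').1]
            simp only [pvE, pvScan, hp, reduceIte, List.append_assoc, List.singleton_append]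
      · by_cases hc : c = '}'
        · subst hc
          have hstep : pvStepB (blocks, acc, true) '}' = (pvEmit blocks true acc, [], false) := by
            simp [pvStepB]
          rw [List.foldl_cons, hstep, (ih cs' hcs').1, pvE_nil_eq_loopA]
          simp [pvBrace, pvScan, List.append_nil]
        · have hstep : pvStepB (blocks, acc, true) c = (blocks, acc ++ [c], true) := by
            simp [pvStepB, hc]
          rw [List.foldl_cons, hstep, (ih cs' hcs').2, pvBrace_cons_ne c cs' blocks acc hc]

-- ===== VERDICT (by name: the statement is the Claim_ definition above) =====
theorem parse_text_blocks_spec : Claim_equal_parse_text_blocks := by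
  intro text selected_voice _
  unfold Spec_parse_text_blocks parse_text_blocks parse_text_blocks_alt
  have h := (pvFold_spec text.toList.length text.toList le_rfl).1 [] []
  rw [pvE_nil_eq_loopA] at h
  exact h.symm
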